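-- pv_equiv track=rewrite | github.com/Vitor-Sallenave/Algorithms-and-Data-Structures-2 | Tasks/EC1/questao1.py | Verificador
-- ===== SOURCE A (Python) =====
-- def Verificador(vet):
--     # Mudanças observadas ao longo da leitura do vetor
--     mudou = 0
--
--     # O primeiro número sempre deve ser 1
--     i = vet[0]
--
--     if i == 0:
--         return False
--     else:
--         for elem in vet[1:]:
--             if elem != i:
--                 mudou += 1
--             i = elem
--
--     return False if mudou > 1 else True
-- ===== SOURCE B (Python) =====
-- from itertools import dropwhile
--
-- def Verificador(vet):
--     if vet[0] == 0:
--         return False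
--     # Stage 1: strip the leading run of vet[0]-values.
--     rest = list(dropwhile(lambda x: x == vet[0], vet[1:]))
--     if not rest:
--         return True
--     # Stage 2: the remainder must be a single constant run.
--     return all(x == rest[0] for x in rest)
-- ===== Notes on version B (the rewrite author's own statement) =====
-- stated objective: alternative
-- what changed: Replaces the single-pass previous-element transition counter with two staged scans: dropwhile strips the leading run of the first value, then all() checks that the remainder is one constant run.
import Mathlib
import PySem

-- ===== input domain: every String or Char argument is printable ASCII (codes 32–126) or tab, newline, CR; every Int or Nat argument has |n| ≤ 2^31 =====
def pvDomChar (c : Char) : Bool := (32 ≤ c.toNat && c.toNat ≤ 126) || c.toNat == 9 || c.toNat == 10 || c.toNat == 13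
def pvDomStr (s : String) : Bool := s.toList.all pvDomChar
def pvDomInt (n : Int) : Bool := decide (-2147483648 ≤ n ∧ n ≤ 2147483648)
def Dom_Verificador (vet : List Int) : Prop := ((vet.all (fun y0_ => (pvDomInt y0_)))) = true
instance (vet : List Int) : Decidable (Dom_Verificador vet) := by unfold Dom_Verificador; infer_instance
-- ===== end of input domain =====

-- B replaces the single-pass transition counter with two staged scans:
-- dropwhile strips the leading run of vet[0], then all() checks the rest is constant.

-- ===== PORT A =====
-- A: transition-counting loop over vet[1:] with previous-element state.
def Verificador (vet : List Int) : Bool :=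
  match PySem.List.pyGet? vet 0 with
  | none => false        -- IndexError in Python; excluded by Pre_
  | some i0 =>
    if i0 = 0 then false
    else
      let s := (PySem.List.slice vet (some 1) none).foldl
        (fun (s : Int × Int) elem =>
          ((if elem ≠ s.2 then s.1 + 1 else s.1), elem)) ((0 : Int), i0)
      if s.1 > 1 then false else true

-- ===== PORT B =====
def Verificador_alt (vet : List Int) : Bool :=
  match PySem.List.pyGet? vet 0 with
  | none => false        -- IndexError in Python; excluded by Pre_
  | some i0 =>
    if i0 = 0 then false
    else
      -- stage 1: dropwhile(lambda x: x == vet[0], vet[1:])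
      match (PySem.List.slice vet (some 1) none).dropWhile (fun x => x = i0) with
      | [] => true
      -- stage 2: all(x == rest[0] for x in rest)
      | c :: r => (c :: r).all (fun x => x = c)

-- ===== PRECONDITION & SPEC =====
-- Both A and B raise IndexError on the empty list (vet[0]); Pre_ excludes it.
def Pre_Verificador (vet : List Int) : Prop := vet ≠ []
instance (vet : List Int) : Decidable (Pre_Verificador vet) := by unfold Pre_Verificador; infer_instance
def pvWitness_Verificador : List Int := ([1, 1, 2])

def Spec_Verificador (vet : List Int) (out : Bool) : Prop := out = Verificador_alt vet
instance (vet : List Int) (out : Bool) : Decidable (Spec_Verificador vet out) := by unfold Spec_Verificador; infer_instance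

-- ===== CLAIM (what is proved, stated in full; the proofs are below) =====
def Claim_equal_Verificador : Prop := ∀ (vet : List Int), Dom_Verificador vet → Pre_Verificador vet → Spec_Verificador vet (Verificador vet)

-- ===== LEMMAS AND PROOFS =====

-- number of adjacent transitions in a list (A's 'mudou' is pvTrans (i0 :: t))
def pvTrans : List Int → Nat
  | x :: y :: t => (if x = y then 0 else 1) + pvTrans (y :: t)
  | _ => 0

-- A's fold counts exactly pvTrans (i :: t) transitions, on top of m.
theorem pvFold_trans (t : List Int) : ∀ (i m : Int),
    (t.foldl (fun (s : Int × Int) elem =>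
      ((if elem ≠ s.2 then s.1 + 1 else s.1), elem)) (m, i)).1
      = m + (pvTrans (i :: t) : Int) := by
  induction t with
  | nil => intro i m; simp [pvTrans]
  | cons y t ih =>
    intro i m
    rw [List.foldl_cons]
    dsimp only
    by_cases h : y = i
    · rw [if_neg (by simp [h]), ih]
      simp [pvTrans, h]
    · rw [if_pos h, ih]
      have hr : pvTrans (i :: y :: t) = 1 + pvTrans (y :: t) := by
        simp [pvTrans, Ne.symm h]
      rw [hr]; push_cast; ring

theorem pvTrans_zero (y : Int) (t : List Int) :
    pvTrans (y :: t) = 0 ↔ t.all (fun x => x = y) = true := by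
  induction t generalizing y with
  | nil => simp [pvTrans]
  | cons z t ih =>
    simp only [pvTrans, List.all_cons, Bool.and_eq_true, decide_eq_true_eq]
    by_cases h : y = z
    · subst h; simp [ih y]
    · simp only [if_neg h]
      constructor
      · omega
      · intro hc; exact absurd hc.1 (Ne.symm h)

-- B's staged scans decide exactly 'pvTrans (i0 :: t) ≤ 1'.
theorem pvStages_trans (t : List Int) : ∀ (i0 : Int),
    (match t.dropWhile (fun x => x = i0) with
      | [] => true
      | c :: r => (c :: r).all (fun x => x = c))
      = decide (pvTrans (i0 :: t) ≤ 1) := by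
  induction t with
  | nil => intro i0; simp [pvTrans]
  | cons y t ih =>
    intro i0
    by_cases h : y = i0
    · rw [List.dropWhile_cons_of_pos (by simp [h]), ih i0]
      have hr : pvTrans (i0 :: y :: t) = pvTrans (y :: t) := by simp [pvTrans, h]
      rw [hr, h]
    · rw [List.dropWhile_cons_of_neg (by simp [h])]
      have h1 : pvTrans (i0 :: y :: t) = 1 + pvTrans (y :: t) := by
        simp [pvTrans, Ne.symm h]
      have h2 := pvTrans_zero y t
      simp only [List.all_cons, decide_true, Bool.true_and, h1]
      by_cases hz : pvTrans (y :: t) = 0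
      · rw [h2.mp hz, hz]; simp
      · have ha : t.all (fun x => x = y) = false := by
          cases hb : t.all (fun x => x = y)
          · rfl
          · exact absurd (h2.mpr hb) hz
        rw [ha, decide_eq_false (by omega)]

-- ===== VERDICT (by name: the statement is the Claim_ definition above) =====
theorem Verificador_spec : Claim_equal_Verificador := by
  intro vet _ hpre
  unfold Spec_Verificador
  cases vet with
  | nil => exact absurd rfl hpre
  | cons i0 t =>
    simp only [Verificador, Verificador_alt, PySem.List.pyGet?_zero_cons]
    by_cases h0 : i0 = 0
    · simp [h0]
    · rw [if_neg h0, if_neg h0, PySem.List.slice_from_one, List.tail_cons]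
      rw [pvStages_trans t i0]
      rw [pvFold_trans t i0 0]
      by_cases h2 : pvTrans (i0 :: t) ≤ 1
      · have h3 : ¬ ((0:Int) + (pvTrans (i0 :: t) : Int) > 1) := by omega
        simp [h2]
      · have h3 : 1 < pvTrans (i0 :: t) := by omega
        simp [h2, h3]
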